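-- pv_equiv track=rewrite | github.com/oskar-anderson/iti0102-2018 | pr04_adding/adding.py | add_list_elements
-- ===== SOURCE A (Python) =====
-- def get_max_element(int_list):
--     """
--     Return the maximum element in the list.
--
--     If the list is empty return None.
--     :param int_list: List of integers
--     :return: largest int
--     """
--     if len(int_list) == 0:
--         return None
--     best = int_list[0]
--     for element in int_list:
--         if best < element:
--             best = element
--     return best
--
-- def get_min_element(int_list):
--     """
--     Return the minimum element in list.
--
--     If the list is empty return None.
--     :param int_list: List of integers
--     :return: Smallest int
--     """
--     if len(int_list) == 0:
--         return None
--     worst = int_list[0]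
--     for element in int_list:
--         if worst > element:
--             worst = element
--     return worst
--
-- def sort_list(int_list):
--     """
--     Sort the list in descending order.
--
--     :param int_list: List of integers
--     :return: Sorted list of integers
--     """
--     new_list = []
--     list2 = list(int_list)
--     element_count = len(list2)
--     for _ in range(element_count):
--         max_element = get_max_element(list2)
--         list2.remove(max_element)
--         new_list.append(max_element)
--     return new_list
--
-- def add_list_elements(int_list):
--     """
--     Create a new sorted list of the sums of minimum and maximum elements.
--
--     Add together the minimum and maximum element of int_list and add that sum to a new list
--     Repeat the process until all elements in the list are used, ignore the median number
--     if the list contains uneven amount of elements.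
--     Sort the new list in descending order.
--     This function must use get_min_element(), get_max_element() and sort_list() functions.
--     :param int_list: List of integers
--     :return: Integer list of sums sorted in descending order.
--     """
--     new_list = []
--     list2 = list(int_list)
--     for i in range(len(int_list) // 2):
--         min_element = get_min_element(list2)
--         max_element = get_max_element(list2)
--         sum_element = min_element + max_element
--         list2.remove(min_element)
--         list2.remove(max_element)
--         new_list.append(sum_element)
--     return sort_list(new_list)
-- ===== SOURCE B (Python) =====
-- def add_list_elements(int_list):
--     """Sort once, pair i-th smallest with i-th largest, sort the sums descending."""
--     s = sorted(int_list)
--     n = len(s)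
--     sums = [s[i] + s[n - 1 - i] for i in range(n // 2)]
--     return sorted(sums, reverse=True)
-- ===== Notes on version B (the rewrite author's own statement) =====
-- stated objective: faster
-- what changed: Replaced the repeated linear min/max scans plus remove() and the selection sort at the end by one ascending sort, a single pass pairing sorted[i] with sorted[n-1-i], and a library sort of the sums.
import Mathlib
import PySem

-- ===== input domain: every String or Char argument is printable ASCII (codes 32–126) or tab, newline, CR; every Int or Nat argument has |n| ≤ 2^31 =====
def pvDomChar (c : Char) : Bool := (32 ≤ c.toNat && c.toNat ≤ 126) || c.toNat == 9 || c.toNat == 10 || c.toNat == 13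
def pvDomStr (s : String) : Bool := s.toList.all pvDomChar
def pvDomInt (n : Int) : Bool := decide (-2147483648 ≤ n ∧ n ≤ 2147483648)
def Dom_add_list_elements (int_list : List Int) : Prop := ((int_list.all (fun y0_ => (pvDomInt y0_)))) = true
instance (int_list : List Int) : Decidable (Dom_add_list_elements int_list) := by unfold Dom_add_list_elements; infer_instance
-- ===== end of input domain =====

-- B replaces A's repeated linear min/max scans + remove() and its selection sort by one
-- ascending sort, pairing sorted[i] with sorted[n-1-i], and a library sort of the sums (faster).

-- ===== PORT A =====
def get_max_element (int_list : List Int) : Option Int :=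
  match int_list with
  | [] => none
  | b :: _ => some (int_list.foldl (fun best element => if best < element then element else best) b)

def get_min_element (int_list : List Int) : Option Int :=
  match int_list with
  | [] => none
  | b :: _ => some (int_list.foldl (fun worst element => if worst > element then element else worst) b)

-- the `for _ in range(element_count)` loop of sort_list; the `none` branches are unreachable
-- (fuel starts at list2.length, so list2 is nonempty and the max is a member)
def sort_list_loop (fuel : Nat) (list2 new_list : List Int) : List Int :=
  match fuel with
  | 0 => new_list
  | k + 1 =>
    match get_max_element list2 with
    | none => new_list
    | some m =>
      match PySem.List.remove? list2 m with
      | none => new_list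
      | some rest => sort_list_loop k rest (new_list ++ [m])

def sort_list (int_list : List Int) : List Int :=
  sort_list_loop int_list.length int_list []

-- the `for i in range(len(int_list) // 2)` loop; the fall-through branches are unreachable
-- (fuel = len // 2 keeps list2 with ≥ 2 elements, so min/max exist and both removes succeed)
def add_loop (fuel : Nat) (list2 new_list : List Int) : List Int :=
  match fuel with
  | 0 => new_list
  | k + 1 =>
    match get_min_element list2, get_max_element list2 with
    | some min_element, some max_element =>
      match PySem.List.remove? list2 min_element with
      | some l1 =>
        match PySem.List.remove? l1 max_element with
        | some l2 => add_loop k l2 (new_list ++ [min_element + max_element])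
        | none => new_list
      | none => new_list
    | _, _ => new_list

def add_list_elements (int_list : List Int) : List Int :=
  sort_list (add_loop (int_list.length / 2) int_list [])

-- ===== PORT B =====
-- s.getD i 0 is exact for s[i] here: every index used satisfies 0 ≤ i < n resp. 0 ≤ n-1-i < n
def add_list_elements_alt (int_list : List Int) : List Int :=
  let s := PySem.List.sorted int_list (fun x => x) false
  let n := s.length
  let sums := (List.range (n / 2)).map (fun i => s.getD i 0 + s.getD (n - 1 - i) 0)
  PySem.List.sorted sums (fun x => x) true

-- ===== PRECONDITION & SPEC =====
def Spec_add_list_elements (int_list : List Int) (out : List Int) : Prop := out = add_list_elements_alt int_list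
instance (int_list : List Int) (out : List Int) : Decidable (Spec_add_list_elements int_list out) := by unfold Spec_add_list_elements; infer_instance

-- ===== CLAIM (what is proved, stated in full; the proofs are below) =====
def Claim_equal_add_list_elements : Prop := ∀ (int_list : List Int), Dom_add_list_elements int_list → Spec_add_list_elements int_list (add_list_elements int_list)

-- ===== LEMMAS AND PROOFS =====

lemma get_max_eq (l : List Int) : get_max_element l = PySem.List.max? l (fun y => y) := by
  cases l with
  | nil => simp [get_max_element, PySem.List.max?]
  | cons x t =>
    have hf : (fun best element : Int => if best < element then element else best) = max := by
      funext b e; rw [max_def]; split_ifs <;> omega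
    rw [get_max_element, PySem.List.max?_id_cons, hf]
    simp [List.foldl_cons]

lemma get_min_eq (l : List Int) : get_min_element l = PySem.List.min? l (fun y => y) := by
  cases l with
  | nil => simp [get_min_element, PySem.List.min?]
  | cons x t =>
    have hf : (fun worst element : Int => if worst > element then element else worst) = min := by
      funext b e; rw [min_def]; split_ifs <;> omega
    rw [get_min_element, PySem.List.min?_id_cons, hf]
    simp [List.foldl_cons]

-- selection sort: the loop produces acc ++ r with r a descending rearrangement of list2
lemma sort_list_loop_spec : ∀ (n : Nat) (l acc : List Int), l.length = n →
    ∃ r, sort_list_loop n l acc = acc ++ r ∧ r.Perm l ∧ r.Pairwise (fun a b => b ≤ a) := by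
  intro n
  induction n with
  | zero =>
    intro l acc h
    have : l = [] := List.length_eq_zero_iff.mp h
    exact ⟨[], by simp [sort_list_loop], by simp [this], by simp⟩
  | succ k ih =>
    intro l acc h
    obtain ⟨x, t, rfl⟩ : ∃ x t, l = x :: t := by
      cases l with
      | nil => simp at h
      | cons x t => exact ⟨x, t, rfl⟩
    obtain ⟨m, hm⟩ : ∃ m, get_max_element (x :: t) = some m := by
      rw [get_max_eq, PySem.List.max?_id_cons]; exact ⟨_, rfl⟩
    have hmem : m ∈ x :: t := PySem.List.max?_mem (by rw [← get_max_eq]; exact hm)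
    have hmax : ∀ y ∈ x :: t, y ≤ m := by
      intro y hy
      exact PySem.List.max?_isMax (key := fun y => y) (by rw [← get_max_eq]; exact hm) y hy
    have hrem : PySem.List.remove? (x :: t) m = some ((x :: t).erase m) :=
      PySem.List.remove?_eq_some_erase _ m hmem
    have hlen : ((x :: t).erase m).length = k := by
      rw [List.length_erase_of_mem hmem]; omega
    obtain ⟨r, hr, hperm, hpw⟩ := ih ((x :: t).erase m) (acc ++ [m]) hlen
    refine ⟨m :: r, ?_, ?_, ?_⟩
    · rw [sort_list_loop]; simp only [hm, hrem]; rw [hr]; simp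
    · exact (hperm.cons m).trans (List.perm_cons_erase hmem).symm
    · exact List.pairwise_cons.mpr ⟨fun b hb => hmax b (List.mem_of_mem_erase (hperm.mem_iff.mp hb)), hpw⟩

-- a descending rearrangement of xs IS sorted(xs, reverse=True)
lemma desc_unique (xs r : List Int) (hp : r.Perm xs) (hs : r.Pairwise (fun a b => b ≤ a)) :
    PySem.List.sorted xs (fun x => x) true = r := by
  rw [← List.reverse_inj]
  apply PySem.List.eq_of_perm_of_pairwise_le_of_injective (fun x : Int => x) (fun _ _ h => h)
  · exact ((List.reverse_perm _).trans ((PySem.List.sorted_perm xs (fun x => x) true).trans hp.symm)).trans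
      (List.reverse_perm r).symm
  · exact List.pairwise_reverse.mpr (PySem.List.sorted_pairwise_rev xs (fun x => x))
  · exact List.pairwise_reverse.mpr hs

lemma sort_list_eq (xs : List Int) : sort_list xs = PySem.List.sorted xs (fun x => x) true := by
  obtain ⟨r, hr, hperm, hpw⟩ := sort_list_loop_spec xs.length xs [] rfl
  rw [sort_list, hr, List.nil_append, desc_unique xs r hperm hpw]

lemma add_loop_acc : ∀ (k : Nat) (l acc : List Int), add_loop k l acc = acc ++ add_loop k l [] := by
  intro k
  induction k with
  | zero => intro l acc; simp [add_loop]
  | succ k ih =>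
    intro l acc
    cases hmn : get_min_element l with
    | none => simp [add_loop, hmn]
    | some mn =>
      cases hmx : get_max_element l with
      | none => simp [add_loop, hmn, hmx]
      | some mx =>
        cases hr1 : PySem.List.remove? l mn with
        | none => simp [add_loop, hmn, hmx, hr1]
        | some l1 =>
          cases hr2 : PySem.List.remove? l1 mx with
          | none => simp [add_loop, hmn, hmx, hr1, hr2]
          | some l2 =>
            simp only [add_loop, hmn, hmx, hr1, hr2]
            rw [ih l2 (acc ++ [mn + mx]), ih l2 ([] ++ [mn + mx])]; simp

-- the sums B builds from an ascending list s
def bSums (s : List Int) : List Int :=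
  (List.range (s.length / 2)).map (fun i => s.getD i 0 + s.getD (s.length - 1 - i) 0)

-- core: A's min/max-pairing loop produces exactly B's sums list
lemma add_loop_eq_bSums : ∀ (n : Nat) (l : List Int), l.length = n →
    add_loop (n / 2) l [] = bSums (PySem.List.sorted l (fun x => x) false) := by
  intro n
  induction n using Nat.strong_induction_on with
  | _ n ih =>
    intro l hl
    match n, hl with
    | 0, hl =>
      have : l = [] := List.length_eq_zero_iff.mp hl
      subst this
      simp [add_loop, bSums, PySem.List.sorted]
    | 1, hl =>
      have hs : (PySem.List.sorted l (fun x : Int => x) false).length = 1 := by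
        rw [(PySem.List.sorted_perm l _ _).length_eq, hl]
      simp [add_loop, bSums, hs]
    | (n + 2), hl =>
      -- names for the sorted list and its decomposition  s = a :: t' ++ [z]
      set s := PySem.List.sorted l (fun x : Int => x) false with hsdef
      have hsperm : s.Perm l := by rw [hsdef]; exact PySem.List.sorted_perm l _ _
      have hslen : s.length = n + 2 := by rw [hsperm.length_eq, hl]
      obtain ⟨a, t, hst⟩ : ∃ a t, s = a :: t := by
        cases hs : s with
        | nil => rw [hs] at hslen; simp at hslen
        | cons a t => exact ⟨a, t, rfl⟩
      obtain ⟨t', z, htz⟩ : ∃ t' z, t = t' ++ [z] := by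
        rcases List.eq_nil_or_concat t with h | ⟨t', z, h⟩
        · rw [hst, h] at hslen; simp at hslen
        · exact ⟨t', z, by simpa [List.concat_eq_append] using h⟩
      have hs_eq : s = a :: (t' ++ [z]) := by rw [hst, htz]
      have ht'len : t'.length = n := by
        have := hslen; rw [hs_eq] at this; simp at this; omega
      -- A's min and max of this round
      obtain ⟨mn, hmn⟩ : ∃ mn, get_min_element l = some mn := by
        rw [get_min_eq]
        cases hl0 : l with
        | nil => rw [hl0] at hl; simp at hl
        | cons x xs => rw [PySem.List.min?_id_cons]; exact ⟨_, rfl⟩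
      obtain ⟨mx, hmx⟩ : ∃ mx, get_max_element l = some mx := by
        rw [get_max_eq]
        cases hl0 : l with
        | nil => rw [hl0] at hl; simp at hl
        | cons x xs => rw [PySem.List.max?_id_cons]; exact ⟨_, rfl⟩
      have hmn' : PySem.List.min? l (fun y => y) = some mn := by rw [← get_min_eq]; exact hmn
      have hmx' : PySem.List.max? l (fun y => y) = some mx := by rw [← get_max_eq]; exact hmx
      have hmnmem : mn ∈ l := PySem.List.min?_mem hmn'
      have hmxmem : mx ∈ l := PySem.List.max?_mem hmx'
      have hmnmin : ∀ y ∈ l, mn ≤ y := fun y hy => PySem.List.min?_isMin (key := fun y => y) hmn' y hy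
      have hmxmax : ∀ y ∈ l, y ≤ mx := fun y hy => PySem.List.max?_isMax (key := fun y => y) hmx' y hy
      -- the head of s is the min value, the last element the max value
      have hamem : a ∈ l := hsperm.mem_iff.mp (by rw [hs_eq]; simp)
      have hzmem : z ∈ l := hsperm.mem_iff.mp (by rw [hs_eq]; simp)
      have ha_le : ∀ y ∈ l, a ≤ y :=
        PySem.List.key_head_sorted_le l (fun x => x) (hsdef.symm.trans hst)
      have hz_ge : ∀ y ∈ s, y ≤ z := by
        have hpw : s.Pairwise (fun x1 x2 : Int => x1 ≤ x2) := by
          rw [hsdef]; exact PySem.List.sorted_pairwise l (fun x => x)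
        rw [hs_eq] at hpw
        have hpw' : ((a :: t') ++ [z]).Pairwise (fun x1 x2 : Int => x1 ≤ x2) := by simpa using hpw
        intro y hy
        rw [hs_eq] at hy
        have hy' : y ∈ (a :: t') ++ [z] := by simpa using hy
        rcases List.mem_append.mp hy' with h | h
        · exact (List.pairwise_append.mp hpw').2.2 y h z (by simp)
        · simp at h; omega
      have ha : a = mn := le_antisymm (ha_le mn hmnmem) (hmnmin a hamem)
      have hz : z = mx := le_antisymm (hmxmax z hzmem) (hz_ge mx (hsperm.mem_iff.mpr hmxmem))
      -- the two removals
      have hrem1 : PySem.List.remove? l mn = some (l.erase mn) :=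
        PySem.List.remove?_eq_some_erase _ mn hmnmem
      have herase1 : (l.erase mn).Perm (t' ++ [mx]) := by
        have h1 : (l.erase mn).Perm (s.erase mn) := (hsperm.erase mn).symm
        have h2 : s.erase mn = t' ++ [mx] := by
          rw [hs_eq, ha, hz, List.erase_cons_head]
        rw [← h2]; exact h1
      have hmxmem1 : mx ∈ l.erase mn := herase1.mem_iff.mpr (by simp)
      have hrem2 : PySem.List.remove? (l.erase mn) mx = some ((l.erase mn).erase mx) :=
        PySem.List.remove?_eq_some_erase _ mx hmxmem1
      have herase2 : ((l.erase mn).erase mx).Perm t' := by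
        have h1 : ((l.erase mn).erase mx).Perm ((t' ++ [mx]).erase mx) := herase1.erase mx
        have h2 : (mx :: (t' ++ [mx]).erase mx).Perm (mx :: t') :=
          (List.perm_cons_erase (by simp : mx ∈ t' ++ [mx])).symm.trans
            (List.perm_append_singleton mx t')
        exact h1.trans h2.cons_inv
      have hl2len : ((l.erase mn).erase mx).length = n := by
        rw [List.length_erase_of_mem hmxmem1, List.length_erase_of_mem hmnmem]; omega
      -- one unfolding of A's loop
      have hfuel : (n + 2) / 2 = n / 2 + 1 := by omega
      have hA : add_loop ((n + 2) / 2) l [] =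
          (mn + mx) :: add_loop (n / 2) ((l.erase mn).erase mx) [] := by
        rw [hfuel]
        simp only [add_loop, hmn, hmx, hrem1, hrem2]
        rw [add_loop_acc (n / 2) ((l.erase mn).erase mx) ([] ++ [mn + mx])]
        simp
      -- the middle of s is the ascending sort of the twice-erased list
      have hmid : PySem.List.sorted ((l.erase mn).erase mx) (fun x => x) false = t' := by
        apply PySem.List.sorted_id_eq_of_perm_of_pairwise
        · exact herase2.symm
        · have hpw : s.Pairwise (fun x1 x2 : Int => x1 ≤ x2) := by
            rw [hsdef]; exact PySem.List.sorted_pairwise l (fun x => x)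
          have hsub : t'.Sublist s := by
            rw [hs_eq]
            exact (List.sublist_append_left t' [z]).trans (List.sublist_cons_self a _)
          exact hpw.sublist hsub
      -- one unfolding of B's sums
      have hB : bSums s = (mn + mx) :: bSums t' := by
        rw [bSums, bSums, hslen, ht'len, hfuel, List.range_succ_eq_map, List.map_cons, List.map_map]
        congr 1
        · rw [hs_eq, ha, hz]
          have h1 : ((mn :: (t' ++ [mx])).getD 0 0) = mn := rfl
          have h2 : ((mn :: (t' ++ [mx])).getD (n + 2 - 1 - 0) 0) = mx := by
            have : n + 2 - 1 - 0 = t'.length + 1 := by omega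
            rw [this, List.getD_cons_succ]
            simp [List.getD]
          rw [h1, h2]
        · apply List.map_congr_left
          intro i hi
          have hi' : i < n / 2 := List.mem_range.mp hi
          have hin : i < n := by omega
          simp only [Function.comp, Nat.succ_eq_add_one]
          have e1 : s.getD (i + 1) 0 = t'.getD i 0 := by
            rw [hs_eq, List.getD_cons_succ,
              List.getD_append t' [z] 0 i (by omega)]
          have e2 : s.getD (n + 2 - 1 - (i + 1)) 0 = t'.getD (n - 1 - i) 0 := by
            have : n + 2 - 1 - Nat.succ i = (n - 1 - i) + 1 := by omega
            rw [hs_eq, this, List.getD_cons_succ,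
              List.getD_append t' [z] 0 (n - 1 - i) (by omega)]
          rw [e1, e2]
      rw [hA, ih n (by omega) ((l.erase mn).erase mx) hl2len, hmid, ← hB]

-- ===== VERDICT (by name: the statement is the Claim_ definition above) =====
theorem add_list_elements_spec : Claim_equal_add_list_elements := by
  intro int_list _
  unfold Spec_add_list_elements add_list_elements add_list_elements_alt
  rw [sort_list_eq, add_loop_eq_bSums int_list.length int_list rfl]
  rfl
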